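-- pv_equiv track=rewrite | github.com/gecko1134/ai-signal-portfolio-optimizer | etf_model_manager.py | suggest_replacements
-- ===== SOURCE A (Python) =====
-- ETF_MODELS = {
--     'Growth': {'VUG': 0.4, 'QQQ': 0.3, 'IWF': 0.3},
--     'Income': {'VYM': 0.4, 'SCHD': 0.3, 'HDV': 0.3},
--     'Balanced': {'VTI': 0.5, 'BND': 0.3, 'VNQ': 0.2}
-- }
--
-- ETF_SIGNAL_SCORES = {
--     'VUG': 82, 'QQQ': 75, 'IWF': 65,
--     'VYM': 58, 'SCHD': 62, 'HDV': 55,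
--     'VTI': 70, 'BND': 50, 'VNQ': 48
-- }
--
-- def suggest_replacements(model_name):
--     portfolio = ETF_MODELS.get(model_name, {})
--     suggestions = {}
--     for etf in portfolio:
--         score = ETF_SIGNAL_SCORES.get(etf, 50)
--         if score < 60:
--             best = max((e for e in ETF_SIGNAL_SCORES.items() if e[1] > score and e[0] not in portfolio), key=lambda x: x[1], default=None)
--             if best: suggestions[etf] = best[0]
--     return suggestions
-- ===== SOURCE B (Python) =====
-- ETF_MODELS = {
--     'Growth': {'VUG': 0.4, 'QQQ': 0.3, 'IWF': 0.3},
--     'Income': {'VYM': 0.4, 'SCHD': 0.3, 'HDV': 0.3},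
--     'Balanced': {'VTI': 0.5, 'BND': 0.3, 'VNQ': 0.2}
-- }
--
-- ETF_SIGNAL_SCORES = {
--     'VUG': 82, 'QQQ': 75, 'IWF': 65,
--     'VYM': 58, 'SCHD': 62, 'HDV': 55,
--     'VTI': 70, 'BND': 50, 'VNQ': 48
-- }
--
-- def suggest_replacements(model_name):
--     portfolio = ETF_MODELS.get(model_name, {})
--     # Compute once the globally best ETF outside the portfolio (first-seen wins ties,
--     # matching max over dict items).
--     best = None
--     for name, score in ETF_SIGNAL_SCORES.items():
--         if name not in portfolio and (best is None or score > best[1]):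
--             best = (name, score)
--     suggestions = {}
--     for etf in portfolio:
--         score = ETF_SIGNAL_SCORES.get(etf, 50)
--         if score < 60 and best is not None and best[1] > score:
--             suggestions[etf] = best[0]
--     return suggestions
-- ===== Notes on version B (the rewrite author's own statement) =====
-- stated objective: simpler
-- what changed: B hoists the loop-invariant candidate search out of the holdings loop: it computes the best non-portfolio ETF once with a single running-max pass over ETF_SIGNAL_SCORES instead of rebuilding a filtered max (generator + max with key) inside every iteration.
import Mathlib
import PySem

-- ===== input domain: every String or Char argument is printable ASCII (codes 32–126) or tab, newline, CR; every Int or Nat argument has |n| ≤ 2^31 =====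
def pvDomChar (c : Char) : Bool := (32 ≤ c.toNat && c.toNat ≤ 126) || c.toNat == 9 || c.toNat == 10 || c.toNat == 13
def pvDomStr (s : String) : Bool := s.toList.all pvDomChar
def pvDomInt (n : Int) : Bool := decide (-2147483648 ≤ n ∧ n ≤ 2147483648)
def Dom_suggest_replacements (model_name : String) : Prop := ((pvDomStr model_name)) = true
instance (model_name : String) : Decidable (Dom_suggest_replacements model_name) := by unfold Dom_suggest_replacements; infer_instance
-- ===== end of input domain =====

-- B computes the invariant "best non-portfolio ETF" once before the holdings loop instead of a
-- filtered max inside every iteration ("simpler"); return values proved equal on all inputs.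

-- ===== PORT A =====
-- ETF_MODELS maps a model to its holdings; the float weights are never used by the function,
-- so the port keeps only the key lists (exact for this function's behaviour).
def pvModels : PySem.Dict String (List String) :=
  PySem.Dict.ofList [("Growth", ["VUG", "QQQ", "IWF"]),
                     ("Income", ["VYM", "SCHD", "HDV"]),
                     ("Balanced", ["VTI", "BND", "VNQ"])]

def pvScores : PySem.Dict String Int :=
  PySem.Dict.ofList [("VUG", 82), ("QQQ", 75), ("IWF", 65),
                     ("VYM", 58), ("SCHD", 62), ("HDV", 55),
                     ("VTI", 70), ("BND", 50), ("VNQ", 48)]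

def suggest_replacements (model_name : String) : List (String × String) :=
  let portfolio := (pvModels.get? model_name).getD []
  let suggestions := portfolio.foldl (fun (sugg : PySem.Dict String String) etf =>
    let score := pvScores.getD etf 50
    if score < 60 then
      let cands := pvScores.items.filter (fun e => e.2 > score && !(portfolio.contains e.1))
      match PySem.List.max? cands (fun x => x.2) with
      | some best => sugg.insert etf best.1
      | none => sugg
    else sugg) PySem.Dict.empty
  suggestions.items

-- ===== PORT B =====
def suggest_replacements_alt (model_name : String) : List (String × String) :=
  let portfolio := (pvModels.get? model_name).getD []
  let best := pvScores.items.foldl (fun (b : Option (String × Int)) p =>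
    if portfolio.contains p.1 then b
    else match b with
      | none => some p
      | some q => if p.2 > q.2 then some p else b) none
  let suggestions := portfolio.foldl (fun (sugg : PySem.Dict String String) etf =>
    let score := pvScores.getD etf 50
    if score < 60 then
      match best with
      | some q => if q.2 > score then sugg.insert etf q.1 else sugg
      | none => sugg
    else sugg) PySem.Dict.empty
  suggestions.items

-- ===== PRECONDITION & SPEC =====
def Spec_suggest_replacements (model_name : String) (out : List (String × String)) : Prop := out = suggest_replacements_alt model_name
instance (model_name : String) (out : List (String × String)) : Decidable (Spec_suggest_replacements model_name out) := by unfold Spec_suggest_replacements; infer_instance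

-- ===== CLAIM (what is proved, stated in full; the proofs are below) =====
def Claim_equal_suggest_replacements : Prop := ∀ (model_name : String), Dom_suggest_replacements model_name → Spec_suggest_replacements model_name (suggest_replacements model_name)

-- ===== LEMMAS AND PROOFS =====
lemma pv_lookup_none (m : String) (h1 : m ≠ "Growth") (h2 : m ≠ "Income") (h3 : m ≠ "Balanced") :
    pvModels.get? m = none := by
  simp [pvModels, PySem.Dict.ofList, PySem.Dict.get?]
  intro a b hmem
  fin_cases hmem
  · exact fun h => h1 h.symm
  · exact fun h => h2 h.symm
  · exact fun h => h3 h.symm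

-- ===== VERDICT (by name: the statement is the Claim_ definition above) =====
theorem suggest_replacements_spec : Claim_equal_suggest_replacements := by
  intro m _
  unfold Spec_suggest_replacements
  by_cases h1 : m = "Growth"
  · subst h1; decide
  by_cases h2 : m = "Income"
  · subst h2; decide
  by_cases h3 : m = "Balanced"
  · subst h3; decide
  simp [suggest_replacements, suggest_replacements_alt, pv_lookup_none m h1 h2 h3]
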